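-- pv_equiv track=rewrite | github.com/cuberhaus/pracpro2 | web/app.py | _strip_echo
-- ===== SOURCE A (Python) =====
-- def _strip_echo(raw: str) -> str:
--     """Remove the '# command args' echo line from output."""
--     lines = raw.split("\n")
--     result: list[str] = []
--     for line in lines:
--         if line.startswith("# "):
--             continue
--         result.append(line)
--     while result and result[-1].strip() == "":
--         result.pop()
--     while result and result[0].strip() == "":
--         result.pop(0)
--     return "\n".join(result)
-- ===== SOURCE B (Python) =====
-- def _strip_echo(raw: str) -> str:
--     """Remove the '# command args' echo line from output."""
--     kept = [ln for ln in raw.split("\n") if not ln.startswith("# ")]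
--     first = last = None
--     for i, ln in enumerate(kept):
--         if ln.strip() != "":
--             if first is None:
--                 first = i
--             last = i
--     if first is None:
--         return ""
--     return "\n".join(kept[first : last + 1])
-- ===== Notes on version B (the rewrite author's own statement) =====
-- stated objective: alternative
-- what changed: Replaces A's two destructive while-pop loops that trim blank boundary lines with a single enumerate pass recording the first and last non-blank indices, then one slice of the filtered lines.
import Mathlib
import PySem

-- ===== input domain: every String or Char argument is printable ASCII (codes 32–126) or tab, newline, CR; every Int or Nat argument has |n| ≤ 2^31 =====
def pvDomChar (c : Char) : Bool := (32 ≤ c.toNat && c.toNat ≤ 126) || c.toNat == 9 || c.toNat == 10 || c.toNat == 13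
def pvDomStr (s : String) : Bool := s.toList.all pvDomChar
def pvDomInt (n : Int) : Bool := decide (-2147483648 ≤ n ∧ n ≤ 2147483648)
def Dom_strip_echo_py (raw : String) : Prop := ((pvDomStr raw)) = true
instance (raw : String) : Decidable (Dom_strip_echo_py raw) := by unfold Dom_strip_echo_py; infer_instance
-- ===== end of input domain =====

-- B finds the first/last non-blank indices in one enumerate pass and slices, instead of A's two boundary while-pop loops (alternative decomposition, same cost).


-- ===== PORT A =====
-- while result and result[-1].strip() == "": result.pop()
def pvTrimEnd (xs : List String) : List String :=
  match h : xs.getLast? with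
  | some lastLine =>
      if PySem.Str.strip lastLine = "" then pvTrimEnd xs.dropLast else xs
  | none => xs
termination_by xs.length
decreasing_by
  have hne : xs ≠ [] := by intro hnil; simp [hnil] at h
  simpa [List.length_dropLast] using Nat.sub_lt (List.length_pos_of_ne_nil hne) one_pos

-- while result and result[0].strip() == "": result.pop(0)
def pvTrimStart : List String → List String
  | [] => []
  | x :: xs => if PySem.Str.strip x = "" then pvTrimStart xs else x :: xs

-- raw.split("\n"): the separator is the non-empty literal "\n", so split? always returns some; getD only totalizes
def strip_echo_py (raw : String) : String :=
  let lines := (PySem.Str.split? raw "\n").getD []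
  let result := lines.foldl
    (fun acc line => if PySem.Str.startswith line "# " then acc else acc ++ [line]) []
  PySem.Str.join "\n" (pvTrimStart (pvTrimEnd result))

-- ===== PORT B =====
-- loop body of 'for i, ln in enumerate(kept): if ln.strip() != "": first = i if first is None else first; last = i'
def pvScan (st : Option Int × Option Int) (p : Int × String) : Option Int × Option Int :=
  if PySem.Str.strip p.2 ≠ "" then (some (st.1.getD p.1), some p.1) else st

def strip_echo_py_alt (raw : String) : String :=
  let kept := ((PySem.Str.split? raw "\n").getD []).filter
    (fun ln => ! PySem.Str.startswith ln "# ")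
  match (PySem.List.enumerate kept).foldl pvScan (none, none) with
  | (some f, some l) => PySem.Str.join "\n" (PySem.List.slice kept (some f) (some (l + 1)))
  | _ => ""

-- ===== PRECONDITION & SPEC =====
def Spec_strip_echo_py (raw : String) (out : String) : Prop := out = strip_echo_py_alt raw
instance (raw : String) (out : String) : Decidable (Spec_strip_echo_py raw out) := by unfold Spec_strip_echo_py; infer_instance

-- ===== CLAIM (what is proved, stated in full; the proofs are below) =====
def Claim_equal_strip_echo_py : Prop := ∀ (raw : String), Dom_strip_echo_py raw → Spec_strip_echo_py raw (strip_echo_py raw)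

-- ===== LEMMAS AND PROOFS =====

-- "this line is non-blank" test shared by both ports
def pvNb (ln : String) : Bool := !(PySem.Str.strip ln == "")

theorem pv_foldl_if_filter (l : List String) (acc : List String) :
    l.foldl (fun acc line => if PySem.Str.startswith line "# " then acc else acc ++ [line]) acc
      = acc ++ l.filter (fun ln => ! PySem.Str.startswith ln "# ") := by
  induction l generalizing acc with
  | nil => simp
  | cons x xs ih =>
    rw [List.foldl_cons]
    by_cases h : PySem.Str.startswith x "# "
    · rw [if_pos h, ih, List.filter_cons_of_neg (by simpa using h)]
    · rw [if_neg h, ih, List.filter_cons_of_pos (by simpa using h)]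
      simp

theorem pvTrimEnd_nil : pvTrimEnd [] = [] := by
  unfold pvTrimEnd; rfl

theorem pvTrimEnd_concat (xs : List String) (x : String) :
    pvTrimEnd (xs ++ [x])
      = if PySem.Str.strip x = "" then pvTrimEnd xs else xs ++ [x] := by
  rw [pvTrimEnd.eq_def]
  split
  case _ lastLine hlast =>
    rw [List.getLast?_concat] at hlast
    injection hlast with hx
    subst hx
    rw [List.dropLast_concat]
  case _ hnone =>
    rw [List.getLast?_concat] at hnone
    exact absurd hnone (by simp)

theorem pvTrimStart_eq_dropWhile (xs : List String) :
    pvTrimStart xs = xs.dropWhile (fun ln => ! pvNb ln) := by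
  induction xs with
  | nil => rfl
  | cons x xs ih =>
    by_cases h : PySem.Str.strip x = "" <;>
      simp [pvTrimStart, pvNb, h, ih]

theorem pv_dropWhile_of_findIdx? (ys : List String) (f : Nat)
    (h : ys.findIdx? pvNb = some f) :
    ys.dropWhile (fun ln => ! pvNb ln) = ys.drop f := by
  induction ys generalizing f with
  | nil => simp at h
  | cons y ys ih =>
    rw [List.findIdx?_cons] at h
    by_cases hy : pvNb y
    · simp [hy] at h
      simp [hy, ← h]
    · simp [hy] at h
      obtain ⟨f', hf', rfl⟩ := h
      simp [hy, ih f' hf']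

theorem pvTrimEnd_of_rfind (xs : List String) (k : Nat)
    (h : xs.reverse.findIdx? pvNb = some k) :
    pvTrimEnd xs = xs.take (xs.length - k) := by
  induction xs using List.reverseRecOn generalizing k with
  | nil => simp at h
  | append_singleton xs x ih =>
    rw [List.reverse_append, List.reverse_singleton, List.singleton_append,
      List.findIdx?_cons] at h
    by_cases hx : pvNb x
    · simp [hx] at h
      subst h
      have hne : ¬ PySem.Str.strip x = "" := by
        simpa [pvNb] using hx
      simp [pvTrimEnd_concat, hne, List.take_of_length_le]
    · simp [hx] at h
      obtain ⟨k', hk', rfl⟩ := h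
      have hkl : k' < xs.length := by
        have := (List.findIdx?_eq_some_iff_getElem.mp hk').1
        simpa using this
      have heq : PySem.Str.strip x = "" := by
        simpa [pvNb] using hx
      have harith : xs.length - k' ≤ xs.length := Nat.sub_le _ _
      rw [pvTrimEnd_concat, if_pos heq, ih k' hk']
      have hlen : (xs ++ [x]).length - (k' + 1) = xs.length - k' := by
        simp
      rw [hlen, List.take_append_of_le_length harith]

theorem pv_fold_fst_some (xs : List (Int × String)) (f : Int) (l? : Option Int) :
    (xs.foldl pvScan (some f, l?)).1 = some f := by
  induction xs generalizing l? with
  | nil => rfl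
  | cons p xs ih =>
    by_cases h : PySem.Str.strip p.2 = "" <;> simp [pvScan, h, ih]

theorem pv_fold_fst_none (xs : List String) (s : Int) (l? : Option Int) :
    ((PySem.List.enumerate xs s).foldl pvScan (none, l?)).1
      = (xs.findIdx? pvNb).map (fun k => s + (k : Int)) := by
  induction xs generalizing s l? with
  | nil => simp [PySem.List.enumerate]
  | cons x xs ih =>
    rw [PySem.List.enumerate_cons, List.foldl_cons, List.findIdx?_cons]
    by_cases h : PySem.Str.strip x = ""
    · have hnb : pvNb x = false := by simp [pvNb, h]
      rw [pvScan, if_neg (not_not_intro h)]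
      rw [ih (s + 1) l?, hnb]
      cases hf : xs.findIdx? pvNb with
      | none => simp
      | some m =>
        simp
        ring
    · have hnb : pvNb x = true := by simp [pvNb, h]
      rw [pvScan, if_pos (by simpa using h)]
      simp [hnb, pv_fold_fst_some]

theorem pv_fold_snd_some (xs : List String) (s : Int)
    (st : Option Int × Option Int) (k : Nat)
    (h : xs.reverse.findIdx? pvNb = some k) :
    ((PySem.List.enumerate xs s).foldl pvScan st).2
      = some (s + ((xs.length - 1 - k : Nat) : Int)) := by
  induction xs using List.reverseRecOn generalizing s st k with
  | nil => simp at h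
  | append_singleton xs x ih =>
    rw [List.reverse_append, List.reverse_singleton, List.singleton_append,
      List.findIdx?_cons] at h
    rw [PySem.List.enumerate_append, List.foldl_append,
      PySem.List.enumerate_cons, PySem.List.enumerate_nil,
      List.foldl_cons, List.foldl_nil]
    by_cases hx : pvNb x
    · rw [if_pos hx] at h
      simp at h
      subst h
      have hne : ¬ PySem.Str.strip x = "" := by simpa [pvNb] using hx
      simp [pvScan, hne]
    · rw [if_neg hx] at h
      simp at h
      obtain ⟨k', hk', rfl⟩ := h
      have hkl : k' < xs.length := by
        have := (List.findIdx?_eq_some_iff_getElem.mp hk').1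
        simpa using this
      have heq : PySem.Str.strip x = "" := by simpa [pvNb] using hx
      rw [show pvScan (List.foldl pvScan st (PySem.List.enumerate xs s))
            (s + (xs.length : Int), x)
          = List.foldl pvScan st (PySem.List.enumerate xs s) from by
        simp [pvScan, heq]]
      rw [ih s st k' hk']
      congr 2
      simp
      omega

theorem pvTrimEnd_all_blank (xs : List String)
    (h : xs.reverse.findIdx? pvNb = none) : pvTrimEnd xs = [] := by
  induction xs using List.reverseRecOn with
  | nil => exact pvTrimEnd_nil
  | append_singleton xs x ih =>
    rw [List.reverse_append, List.reverse_singleton, List.singleton_append,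
      List.findIdx?_cons] at h
    by_cases hx : pvNb x
    · rw [if_pos hx] at h
      simp at h
    · rw [if_neg hx, Option.map_eq_none_iff] at h
      have heq : PySem.Str.strip x = "" := by simpa [pvNb] using hx
      rw [pvTrimEnd_concat, if_pos heq, ih h]

-- the core list-level equivalence, for any line list
theorem pv_main (xs : List String) :
    (match (PySem.List.enumerate xs).foldl pvScan (none, none) with
     | (some f, some l) => PySem.Str.join "\n" (PySem.List.slice xs (some f) (some (l + 1)))
     | _ => "")
      = PySem.Str.join "\n" (pvTrimStart (pvTrimEnd xs)) := by
  cases hf : xs.findIdx? pvNb with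
  | none =>
    -- all lines blank: both sides are ""
    have hall : ∀ x ∈ xs, pvNb x = false := List.findIdx?_eq_none_iff.mp hf
    have hrev : xs.reverse.findIdx? pvNb = none :=
      List.findIdx?_eq_none_iff.mpr (by intro x hx; exact hall x (List.mem_reverse.mp hx))
    have h1 : ((PySem.List.enumerate xs).foldl pvScan (none, none)).1 = none := by
      rw [pv_fold_fst_none, hf]; rfl
    have hpair : (PySem.List.enumerate xs).foldl pvScan (none, none)
        = (none, ((PySem.List.enumerate xs).foldl pvScan (none, none)).2) := by
      exact Prod.ext h1 rfl
    rw [hpair, pvTrimEnd_all_blank xs hrev]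
    rfl
  | some fi =>
    obtain ⟨hfil, hfinb, hfimin⟩ := List.findIdx?_eq_some_iff_getElem.mp hf
    -- the reverse scan also finds something
    have hrev : xs.reverse.findIdx? pvNb ≠ none := by
      intro hn
      have := List.findIdx?_eq_none_iff.mp hn xs[fi]
        (List.mem_reverse.mpr (List.getElem_mem _))
      simp [hfinb] at this
    obtain ⟨k, hk⟩ := Option.ne_none_iff_exists'.mp hrev
    obtain ⟨hkl', hknb, hkmin⟩ := List.findIdx?_eq_some_iff_getElem.mp hk
    have hkl : k < xs.length := by simpa using hkl'
    -- L = index of the last non-blank line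
    set L : Nat := xs.length - 1 - k with hL
    -- first non-blank comes no later than last non-blank
    have hfiL : fi ≤ L := by
      rcases Nat.lt_or_ge L fi with hgt | hle
      case inr => exact hle
      case inl =>
        exfalso
        have hj : xs.length - 1 - fi < k := by omega
        have hblank := hkmin (xs.length - 1 - fi) hj
        simp only [List.getElem_reverse] at hblank
        have hidx : xs.length - 1 - (xs.length - 1 - fi) = fi := by omega
        simp only [hidx] at hblank
        exact hblank hfinb
    -- compute the fold result
    have h1 : ((PySem.List.enumerate xs).foldl pvScan (none, none)).1 = some (fi : Int) := by
      rw [pv_fold_fst_none, hf]; simp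
    have h2 : ((PySem.List.enumerate xs).foldl pvScan (none, none)).2 = some (L : Int) := by
      rw [pv_fold_snd_some xs 0 (none, none) k hk, hL]; simp
    have hpair : (PySem.List.enumerate xs).foldl pvScan (none, none)
        = (some (fi : Int), some (L : Int)) := Prod.ext h1 h2
    rw [hpair]
    -- B's slice
    have hslice : PySem.List.slice xs (some (fi : Int)) (some ((L : Int) + 1))
        = (xs.drop fi).take (L + 1 - fi) := by
      have : ((L : Int) + 1) = ((L + 1 : Nat) : Int) := by push_cast; ring
      rw [this, PySem.List.slice_natCast]
    -- A's trimming
    have htake : pvTrimEnd xs = xs.take (L + 1) := by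
      rw [pvTrimEnd_of_rfind xs k hk]
      congr 1
      omega
    have hfind' : (xs.take (L + 1)).findIdx? pvNb = some fi := by
      rw [List.findIdx?_take, hf]
      simp [Option.guard]
      omega
    have hA : pvTrimStart (pvTrimEnd xs) = (xs.take (L + 1)).drop fi := by
      rw [htake, pvTrimStart_eq_dropWhile, pv_dropWhile_of_findIdx? _ fi hfind']
    simp only [hslice, hA, List.drop_take]

-- ===== VERDICT (by name: the statement is the Claim_ definition above) =====
theorem strip_echo_py_spec : Claim_equal_strip_echo_py := by
  intro raw _
  show strip_echo_py raw = strip_echo_py_alt raw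
  unfold strip_echo_py strip_echo_py_alt
  simp only [pv_foldl_if_filter, List.nil_append]
  exact (pv_main _).symm
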